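-- pv_equiv track=rewrite | github.com/YA-AR/Tetris | strategy_properties.py | altitude_delta
-- ===== SOURCE A (Python) =====
-- def altitude_delta(matrix):
--     holes = []
--     for i in range(len(matrix[0])):
--         index = len(matrix)
--         for j in range(len(matrix)):
--             if matrix[j][i] != 0:
--                 index = len(matrix) - j
--                 break
--         holes.append(index)
--     return max(holes) - min(holes)
-- ===== SOURCE B (Python) =====
-- def altitude_delta(matrix):
--     remaining = list(range(len(matrix[0])))
--     first = last = 0
--     seen = False
--     for j, row in enumerate(matrix):
--         still = [c for c in remaining if row[c] == 0]
--         if len(still) < len(remaining):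
--             if not seen:
--                 first = j
--                 seen = True
--             last = j
--             remaining = still
--             if not remaining:
--                 break
--     if remaining:
--         first = 0
--     return last - first
-- ===== Notes on version B (the rewrite author's own statement) =====
-- stated objective: alternative
-- what changed: B never builds the per-column heights list and never calls max/min: it scans rows top-down maintaining the list of still-all-zero columns, records the row index of the first hit and of the row where the last column is first hit (breaking early), and returns the difference of those two row indices (0 substituted for the first index when some column stays all zero).
import Mathlib
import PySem

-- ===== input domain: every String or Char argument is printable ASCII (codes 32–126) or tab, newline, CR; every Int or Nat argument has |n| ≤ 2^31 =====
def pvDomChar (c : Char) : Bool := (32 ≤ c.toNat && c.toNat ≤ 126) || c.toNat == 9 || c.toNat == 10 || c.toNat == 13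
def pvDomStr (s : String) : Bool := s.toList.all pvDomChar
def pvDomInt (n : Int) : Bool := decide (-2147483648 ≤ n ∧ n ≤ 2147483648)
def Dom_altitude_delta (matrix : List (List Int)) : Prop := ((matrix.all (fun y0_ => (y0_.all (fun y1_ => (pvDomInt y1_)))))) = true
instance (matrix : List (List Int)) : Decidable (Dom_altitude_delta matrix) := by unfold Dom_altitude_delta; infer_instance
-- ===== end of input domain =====

-- B scans rows top-down keeping the list of still-all-zero columns and returns the
-- difference of two ROW indices (first hit row, row emptying that list), never building
-- the heights list or calling max/min (objective: alternative, same asymptotic cost).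

-- ===== PORT A =====
-- inner loop of A: scan the rows with row-counter j for the first nonzero in column i;
-- default len(matrix) if none (matrix[j][i] ported as pyGetD _ _ 0; exact under Pre_)
def aCol (n i : Int) : List (List Int) → Int → Int
  | [], _ => n
  | row :: rest, j => if PySem.List.pyGetD row i 0 ≠ 0 then n - j else aCol n i rest (j + 1)

def altitude_delta (matrix : List (List Int)) : Int :=
  let n : Int := matrix.length
  let holes : List Int :=
    (PySem.List.pyRange 0 (matrix.headI.length : Int) 1).map (fun i => aCol n i matrix 0)
  (PySem.List.max? holes id).getD 0 - (PySem.List.min? holes id).getD 0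

-- ===== PORT B =====
-- B's for-loop over (j, row) with state (remaining, first, last, seen) and the
-- early 'break' when remaining becomes empty; row[c] ported as pyGetD row c 0
-- (exact under Pre_: a c still in remaining is in range of row)
def bLoop : List (List Int) → Int → List Int → Int → Int → Bool → (List Int × Int × Int)
  | [], _, remaining, first, last, _ => (remaining, first, last)
  | row :: rest, j, remaining, first, last, seen =>
      let still := remaining.filter (fun c => PySem.List.pyGetD row c 0 == 0)
      if still.length < remaining.length then
        let first' := if seen then first else j
        if still = [] then (still, first', j)
        else bLoop rest (j + 1) still first' j true
      else bLoop rest (j + 1) remaining first last seen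

def altitude_delta_alt (matrix : List (List Int)) : Int :=
  let r := bLoop matrix 0 (PySem.List.pyRange 0 (matrix.headI.length : Int) 1) 0 0 false
  let first : Int := if r.1 ≠ [] then 0 else r.2.1
  r.2.2 - first

-- ===== PRECONDITION & SPEC =====
-- Pre_ excludes exactly the inputs on which A raises: an empty matrix (IndexError on
-- matrix[0]), an empty first row (ValueError on max([])), and ragged inputs where some
-- column scan reaches a row shorter than the first row before finding a nonzero cell
-- (IndexError on matrix[j][i]); a short row already shadowed by an earlier nonzero in
-- that column is fine and stays inside Pre_.
def Pre_altitude_delta (matrix : List (List Int)) : Prop :=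
  matrix ≠ [] ∧ matrix.headI ≠ [] ∧
  ∀ i < matrix.headI.length, ∀ j < matrix.length,
    (matrix.getD j []).length ≤ i → ∃ j' < j, ((matrix.getD j' []).getD i 0) ≠ 0
instance (matrix : List (List Int)) : Decidable (Pre_altitude_delta matrix) := by
  unfold Pre_altitude_delta; infer_instance
def pvWitness_altitude_delta : List (List Int) := [[0, 1], [1, 0], [0, 0]]
def Spec_altitude_delta (matrix : List (List Int)) (out : Int) : Prop := out = altitude_delta_alt matrix
instance (matrix : List (List Int)) (out : Int) : Decidable (Spec_altitude_delta matrix out) := by unfold Spec_altitude_delta; infer_instance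

-- ===== CLAIM (what is proved, stated in full; the proofs are below) =====
def Claim_equal_altitude_delta : Prop := ∀ (matrix : List (List Int)), Dom_altitude_delta matrix → Pre_altitude_delta matrix → Spec_altitude_delta matrix (altitude_delta matrix)

-- ===== LEMMAS AND PROOFS =====

-- first row index ≥ j at which column c is nonzero (none = column all zero)
def fIdx (c : Int) : List (List Int) → Int → Option Int
  | [], _ => none
  | row :: rest, j => if PySem.List.pyGetD row c 0 ≠ 0 then some j else fIdx c rest (j + 1)

-- the row index at which the first of the columns `rem` is first hit
def minHit : List (List Int) → Int → List Int → Option Int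
  | [], _, _ => none
  | row :: rest, j, rem =>
      if (rem.filter (fun c => PySem.List.pyGetD row c 0 == 0)).length < rem.length
      then some j else minHit rest (j + 1) rem

-- the row index at which the last of the columns `rem` is first hit (none: some column never)
def maxHit : List (List Int) → Int → List Int → Option Int
  | [], _, _ => none
  | row :: rest, j, rem =>
      let still := rem.filter (fun c => PySem.List.pyGetD row c 0 == 0)
      if still.length < rem.length then some ((maxHit rest (j + 1) still).getD j)
      else maxHit rest (j + 1) rem

theorem aCol_eq (n i : Int) (rows : List (List Int)) (j : Int) :
    aCol n i rows j = n - (fIdx i rows j).getD 0 := by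
  induction rows generalizing j with
  | nil => simp [aCol, fIdx]
  | cons row rest ih =>
      simp only [aCol, fIdx]
      split_ifs with h
      · simp
      · exact ih (j + 1)

theorem maxHit_nil_rem (rows : List (List Int)) (j : Int) : maxHit rows j [] = none := by
  induction rows generalizing j with
  | nil => rfl
  | cons row rest ih => simpa [maxHit] using ih (j + 1)

-- no hit among rem in this row: every column of rem stays zero here
theorem nohit_all (row : List Int) (rem : List Int)
    (h : ¬ (rem.filter (fun c => PySem.List.pyGetD row c 0 == 0)).length < rem.length) :
    ∀ c ∈ rem, PySem.List.pyGetD row c 0 = 0 := by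
  intro c hc
  by_contra hne
  exact h (List.length_filter_lt_length_iff_exists.mpr ⟨c, hc, by simpa using hne⟩)

theorem bLoop_eq (rows : List (List Int)) (j : Int) (rem : List Int)
    (first last : Int) (seen : Bool) :
    bLoop rows j rem first last seen =
      (rem.filter (fun c => (fIdx c rows j).isNone),
       if seen then first else (minHit rows j rem).getD first,
       (maxHit rows j rem).getD last) := by
  induction rows generalizing j rem first last seen with
  | nil => simp [bLoop, minHit, maxHit, fIdx, List.filter_eq_self.mpr]
  | cons row rest ih =>
      simp only [bLoop, minHit, maxHit]
      by_cases hhit :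
          (rem.filter (fun c => PySem.List.pyGetD row c 0 == 0)).length < rem.length
      · simp only [if_pos hhit]
        set still := rem.filter (fun c => PySem.List.pyGetD row c 0 == 0) with hstill
        have hfilt : rem.filter (fun c => (fIdx c (row :: rest) j).isNone) =
            still.filter (fun c => (fIdx c rest (j + 1)).isNone) := by
          rw [hstill, List.filter_filter]
          apply List.filter_congr
          intro c _
          simp only [fIdx]
          by_cases hz : PySem.List.pyGetD row c 0 = 0
          · rw [if_neg (by simp [hz])]; simp [hz]
          · rw [if_pos (by simp [hz])]; simp [hz]
        by_cases hnil : still = []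
        · rw [if_pos hnil, hfilt, hnil, maxHit_nil_rem rest (j + 1)]
          cases seen <;> simp
        · rw [if_neg hnil, ih, hfilt]
          cases seen <;> simp
      · -- no hit in this row: state unchanged, fIdx/minHit/maxHit step into rest
        simp only [if_neg hhit]
        rw [ih]
        have hstep : ∀ c ∈ rem, fIdx c (row :: rest) j = fIdx c rest (j + 1) := by
          intro c hc
          simp only [fIdx]
          rw [if_neg (by simp [nohit_all row rem hhit c hc])]
        have hfe : rem.filter (fun c => (fIdx c (row :: rest) j).isNone) =
            rem.filter (fun c => (fIdx c rest (j + 1)).isNone) :=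
          List.filter_congr (fun c hc => by rw [hstep c hc])
        rw [hfe]

theorem fIdx_ge (c : Int) (rows : List (List Int)) (j v : Int) (h : fIdx c rows j = some v) :
    j ≤ v := by
  induction rows generalizing j with
  | nil => simp [fIdx] at h
  | cons row rest ih =>
      simp only [fIdx] at h
      split_ifs at h with hc
      · simp at h; omega
      · have := ih (j + 1) h; omega

theorem minHit_none_iff (rows : List (List Int)) (j : Int) (rem : List Int) :
    minHit rows j rem = none ↔ ∀ c ∈ rem, fIdx c rows j = none := by
  induction rows generalizing j with
  | nil => simp [minHit, fIdx]
  | cons row rest ih =>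
      simp only [minHit, fIdx]
      split_ifs with h
      · simp only [false_iff]
        intro hall
        obtain ⟨c, hc, hp⟩ := List.length_filter_lt_length_iff_exists.mp h
        have := hall c hc
        rw [if_pos (by simpa using hp)] at this
        simp at this
      · rw [ih (j + 1)]
        constructor
        · intro hall c hc
          rw [if_neg (by simpa using nohit_all row rem h c hc)]
          exact hall c hc
        · intro hall c hc
          have := hall c hc
          rwa [if_neg (by simp [nohit_all row rem h c hc])] at this

theorem minHit_some (rows : List (List Int)) (j : Int) (rem : List Int) (m : Int)
    (h : minHit rows j rem = some m) :
    (∃ c ∈ rem, fIdx c rows j = some m) ∧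
      ∀ c ∈ rem, ∀ v, fIdx c rows j = some v → m ≤ v := by
  induction rows generalizing j with
  | nil => simp [minHit] at h
  | cons row rest ih =>
      simp only [minHit] at h
      split_ifs at h with hhit
      · have hm : j = m := by simpa using h
        subst hm
        obtain ⟨c, hc, hp⟩ := List.length_filter_lt_length_iff_exists.mp hhit
        refine ⟨⟨c, hc, by simp only [fIdx]; rw [if_pos (by simpa using hp)]⟩, ?_⟩
        intro c' hc' v hv
        simp only [fIdx] at hv
        split_ifs at hv with hc0
        · simp at hv; omega
        · have := fIdx_ge c' rest (j + 1) v hv; omega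
      · obtain ⟨hex, hbd⟩ := ih (j + 1) h
        constructor
        · obtain ⟨c, hc, hfc⟩ := hex
          exact ⟨c, hc, by simp only [fIdx]; rw [if_neg (by simp [nohit_all row rem hhit c hc])]; exact hfc⟩
        · intro c hc v hv
          simp only [fIdx] at hv
          rw [if_neg (by simp [nohit_all row rem hhit c hc])] at hv
          exact hbd c hc v hv

theorem maxHit_none_iff (rows : List (List Int)) (j : Int) (rem : List Int) :
    maxHit rows j rem = none ↔ ∀ c ∈ rem, fIdx c rows j = none := by
  induction rows generalizing j rem with
  | nil => simp [maxHit, fIdx]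
  | cons row rest ih =>
      simp only [maxHit]
      split_ifs with hhit
      · simp only [false_iff]
        intro hall
        obtain ⟨c, hc, hp⟩ := List.length_filter_lt_length_iff_exists.mp hhit
        have := hall c hc
        rw [show fIdx c (row :: rest) j = some j by
          simp only [fIdx]; rw [if_pos (by simpa using hp)]] at this
        simp at this
      · rw [ih (j + 1) rem]
        constructor
        · intro hall c hc
          simp only [fIdx]
          rw [if_neg (by simp [nohit_all row rem hhit c hc])]
          exact hall c hc
        · intro hall c hc
          have := hall c hc
          simp only [fIdx] at this
          rwa [if_neg (by simp [nohit_all row rem hhit c hc])] at this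

theorem maxHit_some (rows : List (List Int)) (j : Int) (rem : List Int) (m : Int)
    (h : maxHit rows j rem = some m) :
    (∃ c ∈ rem, fIdx c rows j = some m) ∧
      ∀ c ∈ rem, ∀ v, fIdx c rows j = some v → v ≤ m := by
  induction rows generalizing j rem m with
  | nil => simp [maxHit] at h
  | cons row rest ih =>
      simp only [maxHit] at h
      split_ifs at h with hhit
      · -- a hit in this row; m = (maxHit rest (j+1) still).getD j
        set still := rem.filter (fun c => PySem.List.pyGetD row c 0 == 0) with hstill
        have hm : m = (maxHit rest (j + 1) still).getD j := by simpa using h.symm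
        obtain ⟨c0, hc0, hp0⟩ := List.length_filter_lt_length_iff_exists.mp hhit
        rcases hrec : maxHit rest (j + 1) still with _ | m'
        · -- no later hit: m = j, witnessed by the column hit in this row
          have hj : m = j := by rw [hrec] at hm; simpa using hm
          refine ⟨⟨c0, hc0, by
            simp only [fIdx]; rw [if_pos (by simpa using hp0), hj]⟩, ?_⟩
          intro c hc v hv
          simp only [fIdx] at hv
          split_ifs at hv with hz
          · simp at hv; omega
          · -- c stayed zero here, so c ∈ still; but maxHit of still is none → fIdx none
            have hcs : c ∈ still := by
              rw [hstill]; exact List.mem_filter.mpr ⟨hc, by simp [not_not.mp hz]⟩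
            have := (maxHit_none_iff rest (j + 1) still).mp hrec c hcs
            rw [this] at hv; simp at hv
        · -- a later hit: m = m', coming from a column of still
          have hj : m = m' := by rw [hrec] at hm; simpa using hm
          obtain ⟨⟨c, hcs, hfc⟩, hbd⟩ := ih (j + 1) still m' hrec
          have hcz : PySem.List.pyGetD row c 0 = 0 := by
            have := (List.mem_filter.mp (hstill ▸ hcs)).2; simpa using this
          refine ⟨⟨c, (List.mem_filter.mp (hstill ▸ hcs)).1, by
            simp only [fIdx]; rw [if_neg (by simp [hcz]), hj]; exact hfc⟩, ?_⟩
          intro c' hc' v hv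
          simp only [fIdx] at hv
          split_ifs at hv with hz
          · have : j + 1 ≤ m' := fIdx_ge c rest (j + 1) m' hfc
            simp at hv; omega
          · have hcs' : c' ∈ still := by
              rw [hstill]; exact List.mem_filter.mpr ⟨hc', by simp [not_not.mp hz]⟩
            have := hbd c' hcs' v hv; omega
      · obtain ⟨⟨c, hc, hfc⟩, hbd⟩ := ih (j + 1) rem m h
        refine ⟨⟨c, hc, ?_⟩, ?_⟩
        · simp only [fIdx]
          rw [if_neg (by simp [nohit_all row rem hhit c hc])]
          exact hfc
        intro c' hc' v hv
        simp only [fIdx] at hv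
        rw [if_neg (by simp [nohit_all row rem hhit c' hc'])] at hv
        exact hbd c' hc' v hv

-- max(xs)/min(xs) as foldl is determined by membership + being a bound
theorem foldl_max_eq_of (t : List Int) (a b : Int)
    (hmem : b = a ∨ b ∈ t) (ha : a ≤ b) (hub : ∀ y ∈ t, y ≤ b) :
    t.foldl max a = b := by
  obtain ⟨h1, h2⟩ := PySem.List.le_foldl_max t a
  have hfb : t.foldl max a ≤ b := by
    rcases PySem.List.foldl_max_mem t a with h3 | h3
    · omega
    · exact hub _ h3
  have hbf : b ≤ t.foldl max a := by
    rcases hmem with rfl | hb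
    · exact h1
    · exact h2 b hb
  omega

theorem foldl_min_eq_of (t : List Int) (a b : Int)
    (hmem : b = a ∨ b ∈ t) (ha : b ≤ a) (hlb : ∀ y ∈ t, b ≤ y) :
    t.foldl min a = b := by
  obtain ⟨h1, h2⟩ := PySem.List.foldl_min_le t a
  have hfb : b ≤ t.foldl min a := by
    rcases PySem.List.foldl_min_mem t a with h3 | h3
    · omega
    · exact hlb _ h3
  have hbf : t.foldl min a ≤ b := by
    rcases hmem with rfl | hb
    · exact h1
    · exact h2 b hb
  omega

theorem G_nonneg (matrix : List (List Int)) (c : Int) : 0 ≤ (fIdx c matrix 0).getD 0 := by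
  rcases h : fIdx c matrix 0 with _ | v
  · simp
  · simpa using fIdx_ge c matrix 0 v h

theorem altitude_delta_spec : Claim_equal_altitude_delta := by
  intro matrix _ hpre
  obtain ⟨hne, hhne, -⟩ := hpre
  unfold Spec_altitude_delta altitude_delta altitude_delta_alt
  rw [bLoop_eq]
  have hw : (0 : Int) < (matrix.headI.length : Int) := by
    have : matrix.headI.length ≠ 0 := by simpa using hhne
    omega
  set n : Int := (matrix.length : Int) with hn
  set w : Int := (matrix.headI.length : Int) with hwdef
  set G : Int → Int := fun c => (fIdx c matrix 0).getD 0 with hG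
  set cols : List Int := PySem.List.pyRange 0 w 1 with hcols
  have hmem0 : (0 : Int) ∈ cols := by rw [hcols]; exact PySem.List.mem_pyRange_one.mpr ⟨le_refl 0, hw⟩
  have hcons : cols = 0 :: PySem.List.pyRange 1 w 1 := by
    rw [hcols]; exact PySem.List.pyRange_one_cons hw
  -- the two sides' target values
  set M : Int := (maxHit matrix 0 cols).getD 0 with hM
  set F : Int := if cols.filter (fun c => (fIdx c matrix 0).isNone) ≠ [] then 0
    else (minHit matrix 0 cols).getD 0 with hF
  -- properties of F : it is min of G over cols
  have hFprop : (∃ c ∈ cols, G c = F) ∧ ∀ c ∈ cols, F ≤ G c := by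
    by_cases hfil : cols.filter (fun c => (fIdx c matrix 0).isNone) = []
    · -- every column is hit
      have hall : ∀ c ∈ cols, (fIdx c matrix 0).isNone = false := by
        intro c hc
        by_contra hcn
        have : c ∈ cols.filter (fun c => (fIdx c matrix 0).isNone) :=
          List.mem_filter.mpr ⟨hc, by simpa using hcn⟩
        simp [hfil] at this
      have h0some : fIdx 0 matrix 0 ≠ none := by
        have := hall 0 hmem0
        rcases h : fIdx 0 matrix 0 with _ | v
        · rw [h] at this; simp at this
        · simp
      have hminne : minHit matrix 0 cols ≠ none := by
        intro hcon
        exact h0some ((minHit_none_iff matrix 0 cols).mp hcon 0 hmem0)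
      rcases hmin : minHit matrix 0 cols with _ | m
      · exact absurd hmin hminne
      obtain ⟨⟨c, hc, hfc⟩, hbd⟩ := minHit_some matrix 0 cols m hmin
      have hFm : F = m := by rw [hF, if_neg (by simp [hfil]), hmin]; rfl
      refine ⟨⟨c, hc, by rw [hG]; simp [hfc, hFm]⟩, ?_⟩
      intro c' hc'
      have := hall c' hc'
      rcases h : fIdx c' matrix 0 with _ | v
      · rw [h] at this; simp at this
      · rw [hFm, hG]; simp only [h, Option.getD_some]
        exact hbd c' hc' v h
    · -- some column is never hit: F = 0
      have hF0 : F = 0 := by rw [hF, if_pos hfil]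
      obtain ⟨c, hcf⟩ := List.exists_mem_of_ne_nil _ hfil
      obtain ⟨hc, hcn⟩ := List.mem_filter.mp hcf
      have : fIdx c matrix 0 = none := by
        rcases h : fIdx c matrix 0 with _ | v
        · rfl
        · rw [h] at hcn; simp at hcn
      exact ⟨⟨c, hc, by rw [hG, hF0]; simp [this]⟩,
        fun c' _ => by rw [hF0]; exact G_nonneg matrix c'⟩
  -- properties of M : it is max of G over cols
  have hMprop : (∃ c ∈ cols, G c = M) ∧ ∀ c ∈ cols, G c ≤ M := by
    rcases hmax : maxHit matrix 0 cols with _ | m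
    · -- no column ever hit: all G = 0, M = 0
      have hall := (maxHit_none_iff matrix 0 cols).mp hmax
      have hM0 : M = 0 := by rw [hM, hmax]; rfl
      exact ⟨⟨0, hmem0, by rw [hG, hM0]; simp [hall 0 hmem0]⟩,
        fun c hc => by rw [hG, hM0]; simp [hall c hc]⟩
    · obtain ⟨⟨c, hc, hfc⟩, hbd⟩ := maxHit_some matrix 0 cols m hmax
      have hMm : M = m := by rw [hM, hmax]; rfl
      have hm0 : 0 ≤ m := by simpa using fIdx_ge c matrix 0 m hfc
      refine ⟨⟨c, hc, by rw [hG, hMm]; simp [hfc]⟩, ?_⟩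
      intro c' hc'
      rcases h : fIdx c' matrix 0 with _ | v
      · rw [hG, hMm]; simp [h, hm0]
      · rw [hG, hMm]; simp only [h, Option.getD_some]
        exact hbd c' hc' v h
  -- A's holes list, rewritten through aCol_eq and the cons decomposition of cols
  have hmap : ∀ l : List Int, l.map (fun i => aCol n i matrix 0) = l.map (fun i => n - G i) :=
    fun l => List.map_congr_left (fun i _ => by rw [aCol_eq, hG])
  rw [hcons]
  dsimp only
  rw [List.map_cons, show (id : Int → Int) = fun y => y from rfl,
    PySem.List.max?_id_cons, PySem.List.min?_id_cons]
  simp only [Option.getD_some]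
  have hmax_eq : (List.map (fun i => aCol n i matrix 0) (PySem.List.pyRange 1 w 1)).foldl max
      (aCol n 0 matrix 0) = n - F := by
    rw [hmap, aCol_eq]
    rw [show ((fIdx (0 : Int) matrix 0).getD 0) = G 0 from rfl]
    apply foldl_max_eq_of
    · obtain ⟨c, hc, hGc⟩ := hFprop.1
      rw [hcons] at hc
      rcases List.mem_cons.mp hc with rfl | hc'
      · left; rw [hGc]
      · right; rw [← hGc]; exact List.mem_map.mpr ⟨c, hc', rfl⟩
    · have := hFprop.2 0 hmem0; omega
    · intro y hy
      obtain ⟨c, hc, rfl⟩ := List.mem_map.mp hy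
      have : c ∈ cols := by rw [hcons]; exact List.mem_cons_of_mem _ hc
      have := hFprop.2 c this; omega
  have hmin_eq : (List.map (fun i => aCol n i matrix 0) (PySem.List.pyRange 1 w 1)).foldl min
      (aCol n 0 matrix 0) = n - M := by
    rw [hmap, aCol_eq]
    rw [show ((fIdx (0 : Int) matrix 0).getD 0) = G 0 from rfl]
    apply foldl_min_eq_of
    · obtain ⟨c, hc, hGc⟩ := hMprop.1
      rw [hcons] at hc
      rcases List.mem_cons.mp hc with rfl | hc'
      · left; rw [hGc]
      · right; rw [← hGc]; exact List.mem_map.mpr ⟨c, hc', rfl⟩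
    · have := hMprop.2 0 hmem0; omega
    · intro y hy
      obtain ⟨c, hc, rfl⟩ := List.mem_map.mp hy
      have : c ∈ cols := by rw [hcons]; exact List.mem_cons_of_mem _ hc
      have := hMprop.2 c this; omega
  rw [hmax_eq, hmin_eq]
  simp only [Bool.false_eq_true, if_false]
  rw [← hcons, ← hF]
  omega
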